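-- pv_equiv track=rewrite | github.com/AntonZamyatin/bio-python-course | term1/task4/task4.py | drawborders
-- ===== SOURCE A (Python) =====
-- def drawborders(n):
--     """Fucnction draws boarders."""
--     if n == 1:
--         return ['+']
--     elif n == 2:
--         return ['++',
--                 '++']
--     else:
--         prev = drawborders(n - 2)
--         answ = [0 for x in range(n)]
--         answ[0] = '+'
--         for i in range(n - 2):
--             answ[0] += '-'
--         answ[0] += '+'
--         for i in range(1, n - 1):
--             answ[i] = '|' + prev[i - 1] + '|'
--         answ[n - 1] = '+'
--         for i in range(n - 2):
--             answ[n - 1] += '-'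
--         answ[n - 1] += '+'
--         return answ
-- ===== SOURCE B (Python) =====
-- def drawborders(n):
--     """Row i is computed directly: r = distance to the nearest horizontal edge
--     gives r leading/trailing '|', and the rest is the border of the inner box."""
--     rows = []
--     for i in range(n):
--         r = min(i, n - 1 - i)
--         w = n - 2 * r
--         if w == 1:
--             rows.append('|' * r + '+' + '|' * r)
--         else:
--             rows.append('|' * r + '+' + '-' * (w - 2) + '+' + '|' * r)
--     return rows
-- ===== Notes on version B (the rewrite author's own statement) =====
-- stated objective: faster
-- what changed: Replaces the recursion that builds all smaller squares and re-wraps every inner row with a direct per-row closed form: row i is '|'*r + '+' + '-'*(w-2) + '+' + '|'*r where r = min(i, n-1-i) and w = n-2r, built in one pass with string repetition.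
import Mathlib
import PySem

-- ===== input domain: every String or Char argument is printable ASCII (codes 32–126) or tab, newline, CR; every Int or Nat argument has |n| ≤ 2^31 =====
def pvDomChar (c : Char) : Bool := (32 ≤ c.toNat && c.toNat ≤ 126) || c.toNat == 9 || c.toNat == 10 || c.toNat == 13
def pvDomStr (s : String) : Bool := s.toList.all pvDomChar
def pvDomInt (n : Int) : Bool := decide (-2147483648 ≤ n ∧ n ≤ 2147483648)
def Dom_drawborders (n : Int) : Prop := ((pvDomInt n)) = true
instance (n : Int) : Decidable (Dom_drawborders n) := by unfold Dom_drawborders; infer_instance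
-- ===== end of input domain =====

-- B replaces A's recursive re-wrapping of every smaller square by a direct
-- per-row closed form (distance to the nearest horizontal edge gives the '|'
-- margins, the rest is one inner border); measured faster.

-- ===== PORT A =====
-- answ[0] (= answ[n-1]): '+' then a loop appending '-' n-2 times, then '+'
-- (string concatenation ported on the code-point list, wrapped with String.ofList)
def pvRowA0 (n : Int) : List Char :=
  ((PySem.List.pyRange 0 (n - 2) 1).foldl (fun s _ => s ++ ['-']) ['+']) ++ ['+']

def drawborders (n : Int) : List String :=
  if n = 1 then [String.ofList ['+']]
  else if n = 2 then [String.ofList ['+', '+'], String.ofList ['+', '+']]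
  else if n ≤ 0 then []   -- Python recurses forever here (RecursionError); outside Pre_
  else
    let prev := drawborders (n - 2)
    let top := String.ofList (pvRowA0 n)
    let mid := (PySem.List.pyRange 1 (n - 1) 1).map
      (fun i => String.ofList ('|' :: (PySem.List.pyGetD prev (i - 1) "").toList ++ ['|']))
    top :: mid ++ [String.ofList (pvRowA0 n)]
termination_by n.toNat
decreasing_by omega

-- ===== PORT B =====
-- '|' * r etc. ported as List.replicate r.toNat (Python's str * negative = '' = replicate of clamped 0)
def pvRowB (n i : Int) : String :=
  let r := min i (n - 1 - i)
  let w := n - 2 * r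
  if w = 1 then
    String.ofList (List.replicate r.toNat '|' ++ '+' :: List.replicate r.toNat '|')
  else
    String.ofList (List.replicate r.toNat '|' ++ '+' :: List.replicate (w - 2).toNat '-' ++ '+' :: List.replicate r.toNat '|')

def drawborders_alt (n : Int) : List String :=
  (PySem.List.pyRange 0 n 1).map (fun i => pvRowB n i)

-- ===== PRECONDITION & SPEC =====
-- Pre_: Python A terminates exactly for n ≥ 1; on n ≤ 0 it recurses forever (RecursionError).
def Pre_drawborders (n : Int) : Prop := 1 ≤ n
instance (n : Int) : Decidable (Pre_drawborders n) := by unfold Pre_drawborders; infer_instance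
def pvWitness_drawborders : Int := (3)

def Spec_drawborders (n : Int) (out : List String) : Prop := out = drawborders_alt n
instance (n : Int) (out : List String) : Decidable (Spec_drawborders n out) := by unfold Spec_drawborders; infer_instance

-- ===== CLAIM (what is proved, stated in full; the proofs are below) =====
def Claim_equal_drawborders : Prop := ∀ (n : Int), Dom_drawborders n → Pre_drawborders n → Spec_drawborders n (drawborders n)

-- ===== LEMMAS AND PROOFS =====

-- the literal fold of A's top/bottom row
theorem foldl_dash (l : List Int) (s : List Char) :
    l.foldl (fun s _ => s ++ ['-']) s = s ++ List.replicate l.length '-' := by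
  induction l generalizing s with
  | nil => simp
  | cons x xs ih => simp [ih, List.replicate_succ, List.append_assoc]

theorem range_split (n : Int) (h : 3 ≤ n) :
    PySem.List.pyRange 0 n 1 = 0 :: (PySem.List.pyRange 1 (n - 1) 1 ++ [n - 1]) := by
  have e : PySem.List.pyRange (n - 1) n 1 = [n - 1] := by
    have := PySem.List.pyRange_one_singleton (a := n - 1)
    rwa [sub_add_cancel] at this
  rw [PySem.List.pyRange_one_cons (by omega),
      show (0 : Int) + 1 = 1 from by norm_num,
      PySem.List.pyRange_one_append 1 (n - 1) n (by omega) (by omega), e]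

theorem rowA0_eq (n : Int) :
    pvRowA0 n = '+' :: (List.replicate (n - 2).toNat '-' ++ ['+']) := by
  unfold pvRowA0
  rw [foldl_dash]
  simp [PySem.List.length_pyRange_one]

-- row 0 of B is A's top row
theorem rep_comm {α : Type} (k : Nat) (a : α) (t : List α) :
    List.replicate k a ++ a :: t = a :: (List.replicate k a ++ t) := by
  induction k with
  | zero => simp
  | succ k ih => simp [List.replicate_succ, ih]

theorem rowB_zero (n : Int) (h : 3 ≤ n) :
    pvRowB n 0 = String.ofList (pvRowA0 n) := by
  simp only [pvRowB]
  rw [show min (0 : Int) (n - 1 - 0) = 0 from by omega, if_neg (by omega)]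
  rw [rowA0_eq]
  congr 1
  rw [show n - 2 * (0 : Int) - 2 = n - 2 from by ring]
  simp

theorem rowB_last (n : Int) (h : 3 ≤ n) :
    pvRowB n (n - 1) = pvRowB n 0 := by
  simp only [pvRowB]
  rw [show min (n - 1) (n - 1 - (n - 1)) = min 0 (n - 1 - 0) from by omega]

-- an inner row of B is the corresponding row of the (n-2)-square wrapped in '|'
theorem rowB_mid (n i : Int) (h : 3 ≤ n) (h1 : 1 ≤ i) (h2 : i < n - 1) :
    pvRowB n i = String.ofList ('|' :: (pvRowB (n - 2) (i - 1)).toList ++ ['|']) := by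
  simp only [pvRowB]
  rw [show min (i - 1) (n - 2 - 1 - (i - 1)) = min i (n - 1 - i) - 1 from by omega,
      show n - 2 - 2 * (min i (n - 1 - i) - 1) = n - 2 * min i (n - 1 - i) from by ring,
      show n - 2 * min i (n - 1 - i) - 2 = n - 2 * min i (n - 1 - i) - 2 from rfl]
  have hm : 1 ≤ min i (n - 1 - i) := by omega
  have hk : (min i (n - 1 - i)).toNat = (min i (n - 1 - i) - 1).toNat + 1 := by omega
  split_ifs with hw
  · rw [String.toList_ofList]
    congr 1
    rw [hk, List.replicate_succ']
    simp [rep_comm, List.append_assoc]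
  · rw [String.toList_ofList]
    congr 1
    rw [hk, List.replicate_succ']
    simp [rep_comm, List.append_assoc]

-- B satisfies exactly A's recurrence
theorem alt_rec (n : Int) (h : 3 ≤ n) :
    drawborders_alt n =
      String.ofList (pvRowA0 n) ::
        ((PySem.List.pyRange 1 (n - 1) 1).map
          (fun i => String.ofList ('|' :: (PySem.List.pyGetD (drawborders_alt (n - 2)) (i - 1) "").toList ++ ['|'])))
        ++ [String.ofList (pvRowA0 n)] := by
  conv_lhs => rw [drawborders_alt, range_split n h]
  simp only [List.map_cons, List.map_append, List.map_nil]
  have hmap : (PySem.List.pyRange 1 (n - 1) 1).map (fun i => pvRowB n i)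
      = (PySem.List.pyRange 1 (n - 1) 1).map
          (fun i => String.ofList ('|' :: (PySem.List.pyGetD (drawborders_alt (n - 2)) (i - 1) "").toList ++ ['|'])) := by
    apply List.map_congr_left
    intro i hi
    rw [PySem.List.mem_pyRange_one] at hi
    have hg : PySem.List.pyGetD (drawborders_alt (n - 2)) (i - 1) "" = pvRowB (n - 2) (i - 1) := by
      rw [drawborders_alt,
          PySem.List.pyGetD_map_pyRange_of_nonneg _ _ _ _ (by omega) (by omega)]
    rw [hg]
    exact rowB_mid n i h hi.1 hi.2
  rw [rowB_last n h, rowB_zero n h, hmap]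
  simp [List.cons_append]

theorem key (m : Nat) : 1 ≤ (m : Int) → drawborders (m : Int) = drawborders_alt (m : Int) := by
  induction m using Nat.strong_induction_on with
  | _ m ih =>
    intro h1
    by_cases hm1 : (m : Int) = 1
    · rw [hm1]
      have halt : drawborders_alt 1 = [String.ofList ['+']] := by
        have hr : PySem.List.pyRange 0 1 1 = [0] := by decide
        have hc : pvRowB 1 0 = String.ofList ['+'] := by norm_num [pvRowB]
        simp [drawborders_alt, hr, hc]
      rw [halt, drawborders]
      norm_num
    · by_cases hm2 : (m : Int) = 2
      · rw [hm2]
        have halt : drawborders_alt 2 = [String.ofList ['+', '+'], String.ofList ['+', '+']] := by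
          have hr : PySem.List.pyRange 0 2 1 = [0, 1] := by decide
          have hc0 : pvRowB 2 0 = String.ofList ['+', '+'] := by norm_num [pvRowB]
          have hc1 : pvRowB 2 1 = String.ofList ['+', '+'] := by norm_num [pvRowB]
          simp [drawborders_alt, hr, hc0, hc1]
        rw [halt, drawborders]
        norm_num
      · have h3 : 3 ≤ (m : Int) := by omega
        have e : drawborders ((m : Int) - 2) = drawborders_alt ((m : Int) - 2) := by
          rw [show ((m : Int) - 2) = ((m - 2 : Nat) : Int) from by omega]
          exact ih (m - 2) (by omega) (by omega)
        rw [drawborders, if_neg hm1, if_neg hm2, if_neg (by omega)]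
        rw [alt_rec _ h3, e]

-- ===== VERDICT (by name: the statement is the Claim_ definition above) =====
theorem drawborders_spec : Claim_equal_drawborders := by
  intro n _ hp
  unfold Pre_drawborders at hp
  unfold Spec_drawborders
  have h : n = ((n.toNat : Nat) : Int) := by omega
  rw [h]
  exact key n.toNat (by omega)
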